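-- pv_equiv track=rewrite | github.com/JangYuBBin/PROGRAMMERS | LV1/예산.py | solution
-- ===== SOURCE A (Python) =====
-- from collections import deque
--
-- def solution(d, budget):
--     answer = 0
--
--     d.sort()
--     d = deque(d)
--
--     while d:
--         num = d.popleft()
--
--         if num <= budget:
--             budget -= num
--             answer += 1
--         else:
--             break
--
--     return answer
-- ===== SOURCE B (Python) =====
-- def solution(d, budget):
--     # Sort in place like A (same observable mutation of d), then build the
--     # prefix-sum table and count how many initial prefixes fit the budget.
--     d.sort()
--     total = 0
--     prefixes = []
--     for x in d:
--         total += x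
--         prefixes.append(total)
--     k = 0
--     while k < len(prefixes) and prefixes[k] <= budget:
--         k += 1
--     return k
-- ===== Notes on version B (the rewrite author's own statement) =====
-- stated objective: alternative
-- what changed: Replaces the deque + shrinking-budget + break loop with a two-phase prefix-sum decomposition: build the cumulative-sum table of the sorted list, then count the leading prefixes whose sum is at most the original budget.
import Mathlib
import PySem

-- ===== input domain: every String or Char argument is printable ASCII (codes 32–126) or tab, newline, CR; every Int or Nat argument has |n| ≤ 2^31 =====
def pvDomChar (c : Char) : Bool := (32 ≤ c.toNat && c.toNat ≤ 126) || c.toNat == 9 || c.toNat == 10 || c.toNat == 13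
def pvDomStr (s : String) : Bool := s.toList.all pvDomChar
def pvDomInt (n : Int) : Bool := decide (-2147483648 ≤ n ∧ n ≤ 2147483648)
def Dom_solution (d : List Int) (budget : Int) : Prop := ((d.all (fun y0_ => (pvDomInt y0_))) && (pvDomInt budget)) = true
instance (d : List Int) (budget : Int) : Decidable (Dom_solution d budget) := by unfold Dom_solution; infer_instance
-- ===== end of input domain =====

-- B replaces A's deque + shrinking-budget loop by a prefix-sum table followed by a
-- take-while count (alternative decomposition, same cost). Both Pythons sort d in
-- place; the equivalence proved here is about the return value.

-- ===== PORT A =====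
-- while d: num = d.popleft(); if num <= budget: budget -= num; answer += 1 else break
def solutionLoopA : List Int → Int → Int → Int
  | [], _, answer => answer
  | num :: rest, budget, answer =>
      if num ≤ budget then solutionLoopA rest (budget - num) (answer + 1) else answer

def solution (d : List Int) (budget : Int) : Int :=
  solutionLoopA ((PySem.List.sorted d (fun x => x))) budget 0

-- ===== PORT B =====
-- first pass: total += x; prefixes.append(total)
def solutionPrefixes : List Int → Int → List Int
  | [], _ => []
  | x :: rest, total => (total + x) :: solutionPrefixes rest (total + x)

-- second pass: while k < len(prefixes) and prefixes[k] <= budget: k += 1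
def solutionCount : List Int → Int → Int
  | [], _ => 0
  | p :: rest, budget => if p ≤ budget then 1 + solutionCount rest budget else 0

def solution_alt (d : List Int) (budget : Int) : Int :=
  solutionCount (solutionPrefixes ((PySem.List.sorted d (fun x => x))) 0) budget

-- ===== PRECONDITION & SPEC =====
def Spec_solution (d : List Int) (budget : Int) (out : Int) : Prop := out = solution_alt d budget
instance (d : List Int) (budget : Int) (out : Int) : Decidable (Spec_solution d budget out) := by unfold Spec_solution; infer_instance

-- ===== CLAIM (what is proved, stated in full; the proofs are below) =====
def Claim_equal_solution : Prop := ∀ (d : List Int) (budget : Int), Dom_solution d budget → Spec_solution d budget (solution d budget)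

-- ===== LEMMAS AND PROOFS =====
theorem solutionLoopA_eq_count (xs : List Int) :
    ∀ (b ans t : Int), solutionLoopA xs b ans = ans + solutionCount (solutionPrefixes xs t) (b + t) := by
  induction xs with
  | nil => intro b ans t; simp [solutionLoopA, solutionPrefixes, solutionCount]
  | cons n r ih =>
      intro b ans t
      simp only [solutionLoopA, solutionPrefixes, solutionCount]
      by_cases h : n ≤ b
      · have h' : t + n ≤ b + t := by omega
        rw [if_pos h, if_pos h', ih (b - n) (ans + 1) (t + n)]
        have : b - n + (t + n) = b + t := by omega
        rw [this]; ring
      · have h' : ¬ t + n ≤ b + t := by omega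
        rw [if_neg h, if_neg h']; ring

-- ===== VERDICT (by name: the statement is the Claim_ definition above) =====
theorem solution_spec : Claim_equal_solution := by
  intro d budget _
  unfold Spec_solution solution solution_alt
  rw [solutionLoopA_eq_count ((PySem.List.sorted d (fun x => x))) budget 0 0]
  norm_num
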